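-- pv_equiv track=rewrite | github.com/dikoko/practice | 6 Trees/6-16_bst_leaf_check.py | check_leaf
-- ===== SOURCE A (Python) =====
-- def check_leaf(pre_list):
--
--     def _check(low, high):
--         if low > high:
--             return []
--         if low == high:
--             return [pre_list[low]]
--
--         root_val = pre_list[low]
--         for i in range(low+1, high+1): ####### low + 1
--             if pre_list[i] >= root_val:
--                 break
--         else:
--             i = high+1
--
--         left_leaves = _check(low+1, i-1)
--         right_leaves = _check(i, high)
--
--         return left_leaves + right_leaves
--
--     return _check(0, len(pre_list)-1)
-- ===== SOURCE B (Python) =====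
-- def check_leaf(pre_list):
--     # One-pass stack simulation: a pushed value gets a left child iff something
--     # is pushed directly on top of it, and a right child iff it is the LAST
--     # value popped by an incoming element; so the FIRST value popped when an
--     # element pops two or more is a leaf, and the final stack top is a leaf.
--     leaves = []
--     stack = []
--     for y in pre_list:
--         popped = 0
--         first = 0
--         while stack and stack[-1] <= y:
--             v = stack.pop()
--             if popped == 0:
--                 first = v
--             popped += 1
--         if popped >= 2:
--             leaves.append(first)
--         stack.append(y)
--     if stack:
--         leaves.append(stack[-1])
--     return leaves
-- ===== Notes on version B (the rewrite author's own statement) =====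
-- stated objective: faster
-- what changed: Replaced the O(n^2) recursive index-range partition (rescanning each range for the first element >= root) by a single left-to-right pass with a monotone stack that emits a leaf exactly when an incoming element pops two or more stack entries (plus the final stack top).
import Mathlib
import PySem

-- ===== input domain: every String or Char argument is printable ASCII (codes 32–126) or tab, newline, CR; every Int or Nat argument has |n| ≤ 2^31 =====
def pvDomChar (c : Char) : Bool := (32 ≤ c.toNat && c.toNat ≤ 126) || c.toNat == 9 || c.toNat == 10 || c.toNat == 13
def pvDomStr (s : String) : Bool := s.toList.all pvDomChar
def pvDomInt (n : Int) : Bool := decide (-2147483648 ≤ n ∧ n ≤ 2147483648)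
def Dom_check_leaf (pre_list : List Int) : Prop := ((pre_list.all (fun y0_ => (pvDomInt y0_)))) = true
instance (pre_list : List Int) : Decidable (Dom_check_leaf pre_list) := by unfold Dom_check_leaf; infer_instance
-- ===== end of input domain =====

-- B replaces A's O(n^2) recursive index-range partition by a single left-to-right
-- pass with a monotone stack (leaf = first of ≥2 values popped by one element, plus
-- the final stack top); measured asymptotically faster.

-- ===== PORT A =====
-- the for/break/else scan: first index i in [i0, high] with pre[i] >= root, else high+1
-- (all indices used are in range on every call reachable from check_leaf, so pyGetD's
-- default is never consulted)
def findSplitA (pre : List Int) (root high i0 : Int) : Int :=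
  if _h : i0 > high then high + 1
  else if root ≤ PySem.List.pyGetD pre i0 0 then i0
  else findSplitA pre root high (i0 + 1)
termination_by (high + 1 - i0).toNat
decreasing_by omega

-- bounds of the scan result, cited by checkA's decreasing_by
theorem findSplitA_bounds (pre : List Int) (root high : Int) :
    ∀ i0, i0 ≤ high + 1 → i0 ≤ findSplitA pre root high i0 ∧ findSplitA pre root high i0 ≤ high + 1 := by
  intro i0 h
  fun_induction findSplitA pre root high i0 with
  | case1 i0 h1 => omega
  | case2 i0 h1 h2 => omega
  | case3 i0 h1 h2 ih => have := ih (by omega); omega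

-- literal transliteration of the inner _check(low, high)
def checkA (pre : List Int) (low high : Int) : List Int :=
  if _h1 : low > high then []
  else if _h2 : low = high then [PySem.List.pyGetD pre low 0]
  else
    let root := PySem.List.pyGetD pre low 0
    let i := findSplitA pre root high (low + 1)
    checkA pre (low + 1) (i - 1) ++ checkA pre i high
termination_by (high - low + 1).toNat
decreasing_by
  · have := findSplitA_bounds pre (PySem.List.pyGetD pre low 0) high (low + 1) (by omega); omega
  · have := findSplitA_bounds pre (PySem.List.pyGetD pre low 0) high (low + 1) (by omega); omega

def check_leaf (pre_list : List Int) : List Int :=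
  checkA pre_list 0 ((pre_list.length : Int) - 1)

-- ===== PORT B =====
-- the inner while loop: returns (stack after popping, number popped);
-- the stack is kept top-first, so Python's stack[-1] is the head
def popLoop (stack : List Int) (y : Int) : List Int × Int :=
  match stack with
  | [] => ([], 0)
  | v :: rest => if v ≤ y then ((popLoop rest y).1, (popLoop rest y).2 + 1) else (v :: rest, 0)

-- one iteration of B's for loop over (stack, leaves)
def stepB (st : List Int × List Int) (y : Int) : List Int × List Int :=
  let p := popLoop st.1 y
  (y :: p.1, if 2 ≤ p.2 then st.2 ++ [st.1.headD 0] else st.2)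

-- the trailing 'if stack: leaves.append(stack[-1])'
def finishB (st : List Int × List Int) : List Int :=
  match st.1 with
  | [] => st.2
  | top :: _ => st.2 ++ [top]

def check_leaf_alt (pre_list : List Int) : List Int :=
  finishB (pre_list.foldl stepB ([], []))

-- ===== PRECONDITION & SPEC =====
def Spec_check_leaf (pre_list : List Int) (out : List Int) : Prop := out = check_leaf_alt pre_list
instance (pre_list : List Int) (out : List Int) : Decidable (Spec_check_leaf pre_list out) := by unfold Spec_check_leaf; infer_instance

-- ===== CLAIM (what is proved, stated in full; the proofs are below) =====
def Claim_equal_check_leaf : Prop := ∀ (pre_list : List Int), Dom_check_leaf pre_list → Spec_check_leaf pre_list (check_leaf pre_list)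

-- ===== LEMMAS AND PROOFS =====

-- reference function: leaves of the tree 'root = head, left subtree = maximal
-- strict-prefix of smaller elements, right subtree = the rest'
def fRef : List Int → List Int
  | [] => []
  | [x] => [x]
  | x :: y :: rest =>
    fRef ((y :: rest).takeWhile (fun a => a < x)) ++
    fRef ((y :: rest).dropWhile (fun a => a < x))
termination_by l => l.length
decreasing_by
  · have := (List.takeWhile_prefix (l := y :: rest) (fun a => decide (a < x))).length_le
    simp at *; omega
  · have := List.length_dropWhile_le (fun a => decide (a < x)) (y :: rest)
    simp at *; omega

theorem fRef_cons (x : Int) (l : List Int) (h : l ≠ []) :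
    fRef (x :: l) = fRef (l.takeWhile (fun a => a < x)) ++ fRef (l.dropWhile (fun a => a < x)) := by
  cases l with
  | nil => exact absurd rfl h
  | cons y rest => rw [fRef]

-- pending contribution of the non-top stack entries (each already has a left child):
-- the chunk of vi (bounded by the next entry) is its right subtree
def Kref : List Int → List Int → List Int
  | [], _ => []
  | [_], ys => fRef ys
  | _ :: v2 :: s, ys =>
    fRef (ys.takeWhile (fun a => a < v2)) ++ Kref (v2 :: s) (ys.dropWhile (fun a => a < v2))

-- pending contribution of the whole stack; the top is still childless, so its chunk
-- together with itself forms a whole subtree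
def Href : List Int → List Int → List Int
  | [], ys => fRef ys
  | [v0], ys => fRef (v0 :: ys)
  | v0 :: v1 :: s, ys =>
    fRef (v0 :: ys.takeWhile (fun a => a < v1)) ++ Kref (v1 :: s) (ys.dropWhile (fun a => a < v1))

-- takeWhile/dropWhile plumbing for nested bounds (p stronger than q)
theorem tw_tw {α : Type} (p q : α → Bool) (hpq : ∀ a, p a = true → q a = true) :
    ∀ l : List α, (l.takeWhile q).takeWhile p = l.takeWhile p := by
  intro l; induction l with
  | nil => simp
  | cons h t ih =>
    by_cases hp : p h
    · have hq := hpq h hp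
      simp [List.takeWhile_cons, hp, hq, ih]
    · by_cases hq : q h <;> simp [List.takeWhile_cons, hp, hq]

theorem dw_tw {α : Type} (p q : α → Bool) (hpq : ∀ a, p a = true → q a = true) :
    ∀ l : List α, (l.takeWhile q).dropWhile p = (l.dropWhile p).takeWhile q := by
  intro l; induction l with
  | nil => simp
  | cons h t ih =>
    by_cases hp : p h
    · have hq := hpq h hp
      simp [List.takeWhile_cons, List.dropWhile_cons, hp, hq, ih]
    · by_cases hq : q h <;> simp [List.takeWhile_cons, List.dropWhile_cons, hp, hq]

theorem dw_dw {α : Type} (p q : α → Bool) (hpq : ∀ a, p a = true → q a = true) :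
    ∀ l : List α, (l.dropWhile p).dropWhile q = l.dropWhile q := by
  intro l; induction l with
  | nil => simp
  | cons h t ih =>
    by_cases hp : p h
    · have hq := hpq h hp
      simp [List.dropWhile_cons, hp, hq, ih]
    · simp [List.dropWhile_cons, hp]

theorem Kref_nil : ∀ s : List Int, Kref s [] = [] := by
  intro s; induction s with
  | nil => rfl
  | cons v t ih =>
    cases t with
    | nil => simp [Kref, fRef]
    | cons v2 t2 => simpa [Kref, fRef] using ih

theorem popLoop_nonneg (y : Int) : ∀ s : List Int, 0 ≤ (popLoop s y).2 := by
  intro s; induction s with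
  | nil => simp [popLoop]
  | cons v t ih => by_cases h : v ≤ y <;> simp [popLoop, h] <;> omega

theorem popLoop_chain (y : Int) :
    ∀ s : List Int, s.IsChain (· < ·) → (y :: (popLoop s y).1).IsChain (· < ·) := by
  intro s; induction s with
  | nil => intro _; simp [popLoop]
  | cons v t ih =>
    intro hch
    by_cases h : v ≤ y
    · simpa [popLoop, h] using ih (by simpa using hch.tail)
    · simp only [popLoop, h, if_false]
      exact List.isChain_cons_cons.mpr ⟨by omega, hch⟩

-- pop phase through the non-top entries
theorem pop_K (y : Int) (ys : List Int) :
    ∀ (s : List Int) (v1 : Int), (v1 :: s).IsChain (· < ·) → v1 ≤ y →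
      Kref (v1 :: s) (y :: ys) = Href (y :: (popLoop (v1 :: s) y).1) ys := by
  intro s; induction s with
  | nil => intro v1 _ h1; simp [Kref, popLoop, h1, Href]
  | cons v2 s' ih =>
    intro v1 hch h1
    by_cases h2 : v2 ≤ y
    · have : Kref (v1 :: v2 :: s') (y :: ys) = Kref (v2 :: s') (y :: ys) := by
        simp [Kref, List.takeWhile_cons, List.dropWhile_cons, show ¬ (y < v2) by omega, fRef]
      rw [this, ih v2 (by simpa using hch.tail) h2]
      simp [popLoop, h1, h2]
    · have hyv2 : y < v2 := by omega
      simp only [popLoop, h1, h2, if_true, if_false]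
      simp [Kref, Href, List.takeWhile_cons, List.dropWhile_cons, hyv2]

-- one step of B's loop when the incoming y pops the top (y ≥ v0)
theorem pop_H (y : Int) (ys : List Int) (v0 : Int) (s : List Int)
    (hch : (v0 :: s).IsChain (· < ·)) (hle : v0 ≤ y) :
    Href (v0 :: s) (y :: ys) =
      (if 2 ≤ (popLoop (v0 :: s) y).2 then [v0] else []) ++ Href (y :: (popLoop (v0 :: s) y).1) ys := by
  cases s with
  | nil =>
    have hp : popLoop [v0] y = ([], 1) := by simp [popLoop, hle]
    rw [hp]
    have h2 : ¬ ((2:Int) ≤ 1) := by omega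
    rw [if_neg h2, List.nil_append,
      show Href [v0] (y :: ys) = fRef (v0 :: (y :: ys)) from rfl,
      fRef_cons v0 (y :: ys) (by simp)]
    simp [List.takeWhile_cons, List.dropWhile_cons, show ¬ (y < v0) by omega, fRef, Href]
  | cons v1 s' =>
    by_cases h2 : v1 ≤ y
    · have hp1 : (popLoop (v0 :: v1 :: s') y).1 = (popLoop (v1 :: s') y).1 := by
        simp [popLoop, hle]
      have hp2 : (popLoop (v0 :: v1 :: s') y).2 = (popLoop (v1 :: s') y).2 + 1 := by
        simp [popLoop, hle]
      have hpos : 1 ≤ (popLoop (v1 :: s') y).2 := by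
        have := popLoop_nonneg y s'
        simp [popLoop, h2]; omega
      rw [hp1, hp2, if_pos (by omega)]
      have hK := pop_K y ys s' v1 (by simpa using hch.tail) h2
      rw [← hK]
      simp [Href, List.takeWhile_cons, List.dropWhile_cons, show ¬ (y < v1) by omega, fRef]
    · have hp : popLoop (v0 :: v1 :: s') y = (v1 :: s', 1) := by
        simp [popLoop, hle, h2]
      rw [hp]
      have hyv1 : y < v1 := by omega
      rw [if_neg (by norm_num), List.nil_append]
      simp only [Href, List.takeWhile_cons, List.dropWhile_cons, hyv1, decide_true,
        if_true, decide_false]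
      rw [fRef_cons v0 (y :: List.takeWhile (fun a => decide (a < v1)) ys) (by simp)]
      simp [List.takeWhile_cons, List.dropWhile_cons, show ¬ (y < v0) by omega, fRef]

-- one step of B's loop when the incoming y is pushed without popping (y < v0)
theorem push_H (y : Int) (ys : List Int) (v0 : Int) (s : List Int)
    (hch : (v0 :: s).IsChain (· < ·)) (hlt : y < v0) :
    Href (v0 :: s) (y :: ys) = Href (y :: v0 :: s) ys := by
  cases s with
  | nil =>
    rw [show Href [v0] (y :: ys) = fRef (v0 :: (y :: ys)) from rfl,
      fRef_cons v0 (y :: ys) (by simp)]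
    simp [Href, Kref, List.takeWhile_cons, List.dropWhile_cons, hlt]
  | cons v1 s' =>
    have hv01 : v0 < v1 := (List.isChain_cons_cons.mp hch).1
    have himp : ∀ a : Int, (fun a => decide (a < v0)) a = true → (fun a => decide (a < v1)) a = true := by
      intro a ha; simp at ha ⊢; omega
    have hyv1 : y < v1 := by omega
    simp only [Href, Kref, List.takeWhile_cons, List.dropWhile_cons, hlt, hyv1,
      decide_true, if_true]
    rw [fRef_cons v0 (y :: List.takeWhile (fun a => decide (a < v1)) ys) (by simp)]
    simp only [List.takeWhile_cons, List.dropWhile_cons, hlt, decide_true, if_true]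
    rw [tw_tw _ _ himp ys, dw_tw _ _ himp ys, dw_dw _ _ himp ys, List.append_assoc]

-- the loop invariant: running B's loop from (stack, leaves) and finishing
-- yields leaves ++ (pending contribution of the stack and remaining input)
theorem loop_H :
    ∀ (ys stack leaves : List Int), stack.IsChain (· < ·) →
      finishB (ys.foldl stepB (stack, leaves)) = leaves ++ Href stack ys := by
  intro ys
  induction ys with
  | nil =>
    intro stack leaves hch
    cases stack with
    | nil => simp [finishB, Href, fRef]
    | cons v0 s =>
      cases s with
      | nil => simp [finishB, Href, fRef]
      | cons v1 s' => simp [finishB, Href, Kref_nil, fRef]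
  | cons y ys ih =>
    intro stack leaves hch
    rw [List.foldl_cons]
    have hstep : stepB (stack, leaves) y =
        (y :: (popLoop stack y).1,
         if 2 ≤ (popLoop stack y).2 then leaves ++ [stack.headD 0] else leaves) := rfl
    rw [hstep, ih _ _ (popLoop_chain y stack hch)]
    cases stack with
    | nil => simp [popLoop, Href]
    | cons v0 s =>
      by_cases hle : v0 ≤ y
      · rw [pop_H y ys v0 s hch hle]
        by_cases h2 : 2 ≤ (popLoop (v0 :: s) y).2
        · simp [h2]
        · simp [h2]
      · have hp : popLoop (v0 :: s) y = (v0 :: s, 0) := by simp [popLoop, hle]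
        rw [hp]
        rw [if_neg (by norm_num), push_H y ys v0 s hch (by omega)]

-- B computes fRef
theorem alt_eq_fRef (pre : List Int) : check_leaf_alt pre = fRef pre := by
  have := loop_H pre [] [] (by simp)
  simpa [check_leaf_alt, Href] using this

-- A-side: the scan is takeWhile's length
theorem findSplitA_eq (pre : List Int) (root : Int) :
    ∀ high j, 0 ≤ j → j ≤ high + 1 → high < (pre.length : Int) →
      findSplitA pre root high j =
        j + (((pre.drop j.toNat).take (high + 1 - j).toNat).takeWhile (fun a => a < root)).length := by
  intro high j h0 hj hlen
  fun_induction findSplitA pre root high j with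
  | case1 j h1 =>
    have : (high + 1 - j).toNat = 0 := by omega
    simp [this]; omega
  | case2 j h1 h2 =>
    have hjl : j.toNat < pre.length := by omega
    have hget : PySem.List.pyGetD pre j 0 = pre[j.toNat] :=
      PySem.List.pyGetD_eq_getElem pre 0 (by omega) (by omega)
    have hseg : (pre.drop j.toNat).take (high + 1 - j).toNat =
        pre[j.toNat] :: (pre.drop (j.toNat + 1)).take (high - j).toNat := by
      rw [List.drop_eq_getElem_cons hjl, show (high + 1 - j).toNat = (high - j).toNat + 1 by omega,
        List.take_succ_cons]
    rw [hseg, List.takeWhile_cons, if_neg (by rw [hget] at h2; simp; omega)]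
    simp
  | case3 j h1 h2 ih =>
    have hjl : j.toNat < pre.length := by omega
    have hget : PySem.List.pyGetD pre j 0 = pre[j.toNat] :=
      PySem.List.pyGetD_eq_getElem pre 0 (by omega) (by omega)
    have hseg : (pre.drop j.toNat).take (high + 1 - j).toNat =
        pre[j.toNat] :: (pre.drop (j.toNat + 1)).take (high - j).toNat := by
      rw [List.drop_eq_getElem_cons hjl, show (high + 1 - j).toNat = (high - j).toNat + 1 by omega,
        List.take_succ_cons]
    have ih' := ih (by omega) (by omega)
    rw [hseg, List.takeWhile_cons, if_pos (by rw [hget] at h2; simp; omega)]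
    rw [ih', show ((j : Int) + 1).toNat = j.toNat + 1 by omega,
      show (high + 1 - ((j : Int) + 1)).toNat = (high - j).toNat by omega,
      List.length_cons]
    push_cast
    omega

-- A computes fRef on every index range
theorem checkA_eq (pre : List Int) :
    ∀ (n : Nat) (low high : Int), (high + 1 - low).toNat ≤ n → 0 ≤ low → high < (pre.length : Int) →
      checkA pre low high = fRef ((pre.drop low.toNat).take (high + 1 - low).toNat) := by
  intro n
  induction n with
  | zero =>
    intro low high hn h0 hlen
    have h1 : low > high := by omega
    rw [checkA, dif_pos h1, show (high + 1 - low).toNat = 0 by omega]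
    simp [fRef]
  | succ n ih =>
    intro low high hn h0 hlen
    by_cases h1 : low > high
    · rw [checkA, dif_pos h1, show (high + 1 - low).toNat = 0 by omega]
      simp [fRef]
    · have hll : low.toNat < pre.length := by omega
      have hget : PySem.List.pyGetD pre low 0 = pre[low.toNat] :=
        PySem.List.pyGetD_eq_getElem pre 0 (by omega) (by omega)
      have hseg : (pre.drop low.toNat).take (high + 1 - low).toNat =
          pre[low.toNat] :: (pre.drop (low.toNat + 1)).take (high - low).toNat := by
        rw [List.drop_eq_getElem_cons hll, show (high + 1 - low).toNat = (high - low).toNat + 1 by omega,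
          List.take_succ_cons]
      by_cases h2 : low = high
      · rw [checkA, dif_neg h1, dif_pos h2, hseg, hget,
          show (high - low).toNat = 0 by omega]
        simp [fRef]
      · -- low < high
        have hlh : low < high := by omega
        set x := pre[low.toNat] with hx
        set rest := (pre.drop (low.toNat + 1)).take (high - low).toNat with hrest
        have hrestlen : rest.length = (high - low).toNat := by
          rw [hrest]; simp; omega
        set ℓ := (rest.takeWhile (fun a => a < x)).length with hℓ
        have hℓle : ℓ ≤ (high - low).toNat := by
          rw [hℓ, ← hrestlen]
          exact (List.takeWhile_prefix _).length_le
        have hi : findSplitA pre x high (low + 1) = low + 1 + (ℓ : Int) := by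
          have := findSplitA_eq pre x high (low + 1) (by omega) (by omega) hlen
          rw [this, show (low + 1).toNat = low.toNat + 1 by omega,
            show (high + 1 - (low + 1)).toNat = (high - low).toNat by omega, ← hrest, ← hℓ]
        -- the two recursive segments
        have htw : rest.takeWhile (fun a => a < x) = (pre.drop (low.toNat + 1)).take ℓ := by
          rw [List.prefix_iff_eq_take.mp (List.takeWhile_prefix _), ← hℓ, hrest, List.take_take,
            min_eq_left hℓle]
        have hdw : rest.dropWhile (fun a => a < x) =
            (pre.drop (low.toNat + 1 + ℓ)).take ((high - low).toNat - ℓ) := by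
          have hsplit : rest.takeWhile (fun a => a < x) ++ rest.dropWhile (fun a => a < x) = rest :=
            List.takeWhile_append_dropWhile
          have : rest.dropWhile (fun a => a < x) =
              (rest.takeWhile (fun a => a < x) ++ rest.dropWhile (fun a => a < x)).drop ℓ := by
            rw [hℓ, List.drop_left]
          rw [this, hsplit, hrest, List.drop_take, List.drop_drop,
            show low.toNat + 1 + ℓ = ℓ + (low.toNat + 1) by omega]
        rw [checkA, dif_neg h1, dif_neg h2]
        simp only [hget, hi]
        have hleft := ih (low + 1) (low + 1 + (ℓ : Int) - 1)
          (by omega) (by omega) (by omega)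
        have hright := ih (low + 1 + (ℓ : Int)) high (by omega) (by omega) hlen
        rw [show (low + 1).toNat = low.toNat + 1 by omega,
          show (low + 1 + (ℓ : Int) - 1 + 1 - (low + 1)).toNat = ℓ by omega] at hleft
        rw [show (low + 1 + (ℓ : Int)).toNat = low.toNat + 1 + ℓ by omega,
          show (high + 1 - (low + 1 + (ℓ : Int))).toNat = (high - low).toNat - ℓ by omega] at hright
        have hrne : rest ≠ [] := by
          intro hnil
          rw [hnil] at hrestlen
          simp at hrestlen
          omega
        rw [hleft, hright, hseg, fRef_cons x rest hrne, htw, hdw]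

theorem a_eq_fRef (pre : List Int) : check_leaf pre = fRef pre := by
  have h := checkA_eq pre pre.length 0 ((pre.length : Int) - 1) (by omega) (by omega) (by omega)
  simpa [check_leaf] using h

-- ===== VERDICT (by name: the statement is the Claim_ definition above) =====
theorem check_leaf_spec : Claim_equal_check_leaf := by
  intro pre _
  show check_leaf pre = check_leaf_alt pre
  rw [a_eq_fRef, alt_eq_fRef]
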